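-- pv_equiv track=rewrite | github.com/j4xie/my-prototype-logistics | tests/arena-rl/analyze_results.py | is_functionally_equivalent
-- ===== SOURCE A (Python) =====
-- EQUIVALENT_GROUPS = {
--     # 考勤相关 - 所有都是查询考勤
--     "ATTENDANCE_QUERY": ["ATTENDANCE_QUERY", "ATTENDANCE_STATUS", "ATTENDANCE_TODAY",
--                           "ATTENDANCE_HISTORY", "ATTENDANCE_ANOMALY", "ATTENDANCE_STATS"],
--     # 设备状态相关
--     "EQUIPMENT_STATUS": ["EQUIPMENT_STATUS", "EQUIPMENT_STATUS_UPDATE", "EQUIPMENT_STATS"],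
--     # 告警相关
--     "ALERT_LIST": ["ALERT_LIST", "ALERT_ACTIVE", "ALERT_BY_EQUIPMENT", "ALERT_ACKNOWLEDGE",
--                    "ALERT_DIAGNOSE", "EQUIPMENT_ALERT_LIST"],
--     # 供应商相关
--     "SUPPLIER_QUERY": ["SUPPLIER_QUERY", "SUPPLIER_SEARCH", "SUPPLIER_EVALUATE"],
--     # 客户相关
--     "CUSTOMER_QUERY": ["CUSTOMER_QUERY", "CUSTOMER_SEARCH", "CUSTOMER_PURCHASE_HISTORY"],
--     # 库存/报表相关
--     "MATERIAL_BATCH_QUERY": ["MATERIAL_BATCH_QUERY", "REPORT_INVENTORY", "MATERIAL_LOW_STOCK_ALERT"],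
--     # 过期告警相关
--     "MATERIAL_EXPIRY_ALERT": ["MATERIAL_EXPIRY_ALERT", "MATERIAL_EXPIRED_QUERY", "MATERIAL_EXPIRING_ALERT"],
--     # 质量相关
--     "QUALITY_STATS": ["QUALITY_STATS", "QUALITY_CHECK_QUERY", "REPORT_QUALITY"],
--     # 批次列表相关
--     "PROCESSING_BATCH_LIST": ["PROCESSING_BATCH_LIST", "PROCESSING_BATCH_DETAIL", "REPORT_PRODUCTION",
--                                "REPORT_EFFICIENCY", "REPORT_DASHBOARD_OVERVIEW"],
--     # 发货相关
--     "SHIPMENT_QUERY": ["SHIPMENT_QUERY", "SHIPMENT_STATUS_UPDATE", "SHIPMENT_BY_CUSTOMER"],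
--     # 设备控制相关
--     "EQUIPMENT_CONTROL": ["EQUIPMENT_CONTROL", "EQUIPMENT_START", "EQUIPMENT_STOP"],
--     # 批次完成相关
--     "PROCESSING_BATCH_COMPLETE": ["PROCESSING_BATCH_COMPLETE", "PROCESSING_BATCH_PAUSE"],
-- }
--
-- INTENT_TO_GROUP = {}
--
-- def is_functionally_equivalent(actual, expected):
--     """检查两个意图是否功能等价"""
--     if actual == expected:
--         return True
--
--     # 检查是否在同一等价组
--     actual_group = INTENT_TO_GROUP.get(actual)
--     expected_group = INTENT_TO_GROUP.get(expected)
--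
--     if actual_group and expected_group and actual_group == expected_group:
--         return True
--
--     # 检查交叉组（一个意图可能在多个组中）
--     for group_name, intents in EQUIVALENT_GROUPS.items():
--         if actual in intents and expected in intents:
--             return True
--
--     return False
-- ===== SOURCE B (Python) =====
-- # B: precompute the full equivalence relation as a set of ordered pairs once at
-- # module load; each call is one equality test plus one set-membership test.
-- _GROUPS = [
--     ["ATTENDANCE_QUERY", "ATTENDANCE_STATUS", "ATTENDANCE_TODAY",
--      "ATTENDANCE_HISTORY", "ATTENDANCE_ANOMALY", "ATTENDANCE_STATS"],
--     ["EQUIPMENT_STATUS", "EQUIPMENT_STATUS_UPDATE", "EQUIPMENT_STATS"],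
--     ["ALERT_LIST", "ALERT_ACTIVE", "ALERT_BY_EQUIPMENT", "ALERT_ACKNOWLEDGE",
--      "ALERT_DIAGNOSE", "EQUIPMENT_ALERT_LIST"],
--     ["SUPPLIER_QUERY", "SUPPLIER_SEARCH", "SUPPLIER_EVALUATE"],
--     ["CUSTOMER_QUERY", "CUSTOMER_SEARCH", "CUSTOMER_PURCHASE_HISTORY"],
--     ["MATERIAL_BATCH_QUERY", "REPORT_INVENTORY", "MATERIAL_LOW_STOCK_ALERT"],
--     ["MATERIAL_EXPIRY_ALERT", "MATERIAL_EXPIRED_QUERY", "MATERIAL_EXPIRING_ALERT"],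
--     ["QUALITY_STATS", "QUALITY_CHECK_QUERY", "REPORT_QUALITY"],
--     ["PROCESSING_BATCH_LIST", "PROCESSING_BATCH_DETAIL", "REPORT_PRODUCTION",
--      "REPORT_EFFICIENCY", "REPORT_DASHBOARD_OVERVIEW"],
--     ["SHIPMENT_QUERY", "SHIPMENT_STATUS_UPDATE", "SHIPMENT_BY_CUSTOMER"],
--     ["EQUIPMENT_CONTROL", "EQUIPMENT_START", "EQUIPMENT_STOP"],
--     ["PROCESSING_BATCH_COMPLETE", "PROCESSING_BATCH_PAUSE"],
-- ]
--
-- _EQUIV_PAIRS = frozenset((a, b) for g in _GROUPS for a in g for b in g)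
--
-- def is_functionally_equivalent(actual, expected):
--     """检查两个意图是否功能等价"""
--     return actual == expected or (actual, expected) in _EQUIV_PAIRS
-- ===== Notes on version B (the rewrite author's own statement) =====
-- stated objective: alternative
-- what changed: Replaces the per-call scan over every group (testing both intents against each group list) with the full equivalence relation materialised once at module load as a frozenset of ordered intent pairs; each call is one equality test plus a single set-membership test.
import Mathlib
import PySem

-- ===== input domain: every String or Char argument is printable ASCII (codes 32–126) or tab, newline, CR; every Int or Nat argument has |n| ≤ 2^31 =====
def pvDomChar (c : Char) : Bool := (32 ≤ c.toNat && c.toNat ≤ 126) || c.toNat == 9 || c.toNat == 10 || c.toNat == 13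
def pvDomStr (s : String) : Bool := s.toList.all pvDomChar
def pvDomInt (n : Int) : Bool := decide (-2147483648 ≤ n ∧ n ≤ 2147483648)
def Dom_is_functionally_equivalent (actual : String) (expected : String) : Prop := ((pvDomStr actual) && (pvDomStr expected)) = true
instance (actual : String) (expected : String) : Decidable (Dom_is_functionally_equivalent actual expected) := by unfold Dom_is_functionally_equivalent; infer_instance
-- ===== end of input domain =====

-- B's objective: materialise the equivalence relation once as a set of ordered intent
-- pairs, turning each call into one equality test plus one set-membership test.

-- ===== PORT A =====
-- EQUIVALENT_GROUPS as an insertion-ordered association list (dict iterated by .items()).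
def equivGroups : List (String × List String) :=
  [ ("ATTENDANCE_QUERY", ["ATTENDANCE_QUERY", "ATTENDANCE_STATUS", "ATTENDANCE_TODAY",
      "ATTENDANCE_HISTORY", "ATTENDANCE_ANOMALY", "ATTENDANCE_STATS"]),
    ("EQUIPMENT_STATUS", ["EQUIPMENT_STATUS", "EQUIPMENT_STATUS_UPDATE", "EQUIPMENT_STATS"]),
    ("ALERT_LIST", ["ALERT_LIST", "ALERT_ACTIVE", "ALERT_BY_EQUIPMENT", "ALERT_ACKNOWLEDGE",
      "ALERT_DIAGNOSE", "EQUIPMENT_ALERT_LIST"]),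
    ("SUPPLIER_QUERY", ["SUPPLIER_QUERY", "SUPPLIER_SEARCH", "SUPPLIER_EVALUATE"]),
    ("CUSTOMER_QUERY", ["CUSTOMER_QUERY", "CUSTOMER_SEARCH", "CUSTOMER_PURCHASE_HISTORY"]),
    ("MATERIAL_BATCH_QUERY", ["MATERIAL_BATCH_QUERY", "REPORT_INVENTORY", "MATERIAL_LOW_STOCK_ALERT"]),
    ("MATERIAL_EXPIRY_ALERT", ["MATERIAL_EXPIRY_ALERT", "MATERIAL_EXPIRED_QUERY", "MATERIAL_EXPIRING_ALERT"]),
    ("QUALITY_STATS", ["QUALITY_STATS", "QUALITY_CHECK_QUERY", "REPORT_QUALITY"]),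
    ("PROCESSING_BATCH_LIST", ["PROCESSING_BATCH_LIST", "PROCESSING_BATCH_DETAIL", "REPORT_PRODUCTION",
      "REPORT_EFFICIENCY", "REPORT_DASHBOARD_OVERVIEW"]),
    ("SHIPMENT_QUERY", ["SHIPMENT_QUERY", "SHIPMENT_STATUS_UPDATE", "SHIPMENT_BY_CUSTOMER"]),
    ("EQUIPMENT_CONTROL", ["EQUIPMENT_CONTROL", "EQUIPMENT_START", "EQUIPMENT_STOP"]),
    ("PROCESSING_BATCH_COMPLETE", ["PROCESSING_BATCH_COMPLETE", "PROCESSING_BATCH_PAUSE"]) ]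

-- INTENT_TO_GROUP = {} (empty in the module as given)
def intentToGroup : PySem.Dict String String := PySem.Dict.empty

def is_functionally_equivalent (actual : String) (expected : String) : Bool :=
  if actual == expected then true
  else
    let actual_group := PySem.Dict.get? intentToGroup actual
    let expected_group := PySem.Dict.get? intentToGroup expected
    -- 'actual_group and expected_group and actual_group == expected_group' (None/"" falsy)
    let sameGroup : Bool :=
      match actual_group, expected_group with
      | some x, some y => !(x == "") && !(y == "") && x == y
      | _, _ => false
    if sameGroup then true
    else
      -- for group_name, intents in EQUIVALENT_GROUPS.items(): if actual in intents and expected in intents: return True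
      equivGroups.any (fun p => p.2.contains actual && p.2.contains expected)

-- ===== PORT B =====
-- _GROUPS: the same twelve intent lists, no group names (B never needs them).
def groupsB : List (List String) :=
  [ ["ATTENDANCE_QUERY", "ATTENDANCE_STATUS", "ATTENDANCE_TODAY",
     "ATTENDANCE_HISTORY", "ATTENDANCE_ANOMALY", "ATTENDANCE_STATS"],
    ["EQUIPMENT_STATUS", "EQUIPMENT_STATUS_UPDATE", "EQUIPMENT_STATS"],
    ["ALERT_LIST", "ALERT_ACTIVE", "ALERT_BY_EQUIPMENT", "ALERT_ACKNOWLEDGE",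
     "ALERT_DIAGNOSE", "EQUIPMENT_ALERT_LIST"],
    ["SUPPLIER_QUERY", "SUPPLIER_SEARCH", "SUPPLIER_EVALUATE"],
    ["CUSTOMER_QUERY", "CUSTOMER_SEARCH", "CUSTOMER_PURCHASE_HISTORY"],
    ["MATERIAL_BATCH_QUERY", "REPORT_INVENTORY", "MATERIAL_LOW_STOCK_ALERT"],
    ["MATERIAL_EXPIRY_ALERT", "MATERIAL_EXPIRED_QUERY", "MATERIAL_EXPIRING_ALERT"],
    ["QUALITY_STATS", "QUALITY_CHECK_QUERY", "REPORT_QUALITY"],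
    ["PROCESSING_BATCH_LIST", "PROCESSING_BATCH_DETAIL", "REPORT_PRODUCTION",
     "REPORT_EFFICIENCY", "REPORT_DASHBOARD_OVERVIEW"],
    ["SHIPMENT_QUERY", "SHIPMENT_STATUS_UPDATE", "SHIPMENT_BY_CUSTOMER"],
    ["EQUIPMENT_CONTROL", "EQUIPMENT_START", "EQUIPMENT_STOP"],
    ["PROCESSING_BATCH_COMPLETE", "PROCESSING_BATCH_PAUSE"] ]

-- _EQUIV_PAIRS = frozenset((a, b) for g in _GROUPS for a in g for b in g)
def equivPairs : PySem.Set (String × String) :=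
  PySem.Set.ofList (groupsB.flatMap (fun g => g.flatMap (fun a => g.map (fun b => (a, b)))))

def is_functionally_equivalent_alt (actual : String) (expected : String) : Bool :=
  actual == expected || PySem.Set.contains equivPairs (actual, expected)

-- ===== PRECONDITION & SPEC =====
def Spec_is_functionally_equivalent (actual : String) (expected : String) (out : Bool) : Prop := out = is_functionally_equivalent_alt actual expected
instance (actual : String) (expected : String) (out : Bool) : Decidable (Spec_is_functionally_equivalent actual expected out) := by unfold Spec_is_functionally_equivalent; infer_instance

-- ===== CLAIM =====
def Claim_equal_is_functionally_equivalent : Prop := ∀ (actual : String) (expected : String), Dom_is_functionally_equivalent actual expected → Spec_is_functionally_equivalent actual expected (is_functionally_equivalent actual expected)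

-- ===== LEMMAS AND PROOFS =====

lemma mem_equivPairs (a e : String) :
    (a, e) ∈ equivPairs ↔ ∃ g ∈ groupsB, a ∈ g ∧ e ∈ g := by
  unfold equivPairs
  rw [PySem.Set.mem_ofList]
  simp only [List.mem_flatMap, List.mem_map, Prod.mk.injEq]
  constructor
  · rintro ⟨g, hg, x, hx, y, hy, rfl, rfl⟩
    exact ⟨g, hg, hx, hy⟩
  · rintro ⟨g, hg, ha, he⟩
    exact ⟨g, hg, a, ha, e, he, rfl, rfl⟩

lemma groupsB_eq : groupsB = equivGroups.map Prod.snd := rfl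

-- ===== VERDICT =====
theorem is_functionally_equivalent_spec : Claim_equal_is_functionally_equivalent := by
  intro actual expected _
  unfold Spec_is_functionally_equivalent is_functionally_equivalent is_functionally_equivalent_alt
  by_cases h : actual == expected
  · simp [h]
  · simp only [h, intentToGroup, PySem.Dict.get?_empty, Bool.false_eq_true, if_false,
      Bool.false_or]
    rw [Bool.eq_iff_iff]
    simp only [List.any_eq_true, Bool.and_eq_true, List.contains_eq_mem, decide_eq_true_eq,
      PySem.Set.contains, mem_equivPairs, groupsB_eq, List.mem_map]
    constructor
    · rintro ⟨p, hp, ha, he⟩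
      exact ⟨p.2, ⟨p, hp, rfl⟩, ha, he⟩
    · rintro ⟨g, ⟨p, hp, rfl⟩, ha, he⟩
      exact ⟨p, hp, ha, he⟩
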